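-- pv_equiv track=rewrite | github.com/bhtruon1/121-indexing-query-retrieval | parser.py | gen_tokens_from_string
-- ===== SOURCE A (Python) =====
-- def gen_tokens_from_string(string) -> str:
--     # Generator yielding each word from the string
--     word = u""
--     for char in string:
--         if char.isalpha(): # or char.isdigit():
--             word += char
--         else:
--             if word != u"":
--                 yield word
--             word = u""
--     if word != u"":
--         yield word
-- ===== SOURCE B (Python) =====
-- def gen_tokens_from_string(string) -> str:
--     # Two-level scan: skip non-alphabetic chars, then slice out each whole alpha run.
--     i, n = 0, len(string)
--     while i < n:
--         if string[i].isalpha():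
--             j = i + 1
--             while j < n and string[j].isalpha():
--                 j += 1
--             yield string[i:j]
--             i = j
--         else:
--             i += 1
-- ===== Notes on version B (the rewrite author's own statement) =====
-- stated objective: idiomatic
-- what changed: Replaces the accumulator/flush buffer loop with a run-grouping scan: skip non-alpha characters and slice out each maximal alphabetic run directly.
import Mathlib
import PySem

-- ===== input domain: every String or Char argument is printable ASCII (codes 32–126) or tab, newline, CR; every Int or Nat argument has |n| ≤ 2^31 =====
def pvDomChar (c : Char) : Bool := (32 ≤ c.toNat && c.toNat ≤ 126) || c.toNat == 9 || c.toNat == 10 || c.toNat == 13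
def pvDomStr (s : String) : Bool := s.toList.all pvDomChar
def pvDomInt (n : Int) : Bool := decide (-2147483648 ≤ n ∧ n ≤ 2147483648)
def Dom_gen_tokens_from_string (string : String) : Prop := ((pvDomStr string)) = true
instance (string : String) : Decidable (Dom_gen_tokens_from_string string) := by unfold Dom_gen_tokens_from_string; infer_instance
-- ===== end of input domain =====

-- ===== PORT A =====
-- B replaces A's accumulator/flush buffer loop with a run-grouping scan (idiomatic; return-value equivalence).
-- A's for-loop over the characters, carrying the `word` buffer; final flush at the end.
def pvALoop : List Char → List Char → List String
  | [], word => if word ≠ [] then [String.mk word] else []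
  | c :: rest, word =>
    if PySem.Chars.isalpha c then
      pvALoop rest (word ++ [c])
    else
      if word ≠ [] then String.mk word :: pvALoop rest [] else pvALoop rest []

def gen_tokens_from_string (string : String) : List String :=
  pvALoop string.toList []

-- ===== PORT B =====
-- Source B's outer while: skip a non-alpha char, or slice out the maximal alpha run (the inner while).
def pvBRuns : List Char → List String
  | [] => []
  | c :: rest =>
    if PySem.Chars.isalpha c then
      String.mk (c :: rest.takeWhile PySem.Chars.isalpha) :: pvBRuns (rest.dropWhile PySem.Chars.isalpha)
    else
      pvBRuns rest
termination_by l => l.length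
decreasing_by
  · exact Nat.lt_succ_of_le (List.length_dropWhile_le _ _)
  · exact Nat.lt_succ_self _

def gen_tokens_from_string_alt (string : String) : List String :=
  pvBRuns string.toList

-- ===== PRECONDITION & SPEC =====
def Spec_gen_tokens_from_string (string : String) (out : List String) : Prop := out = gen_tokens_from_string_alt string
instance (string : String) (out : List String) : Decidable (Spec_gen_tokens_from_string string out) := by unfold Spec_gen_tokens_from_string; infer_instance

-- ===== CLAIM =====
def Claim_equal_gen_tokens_from_string : Prop := ∀ (string : String), Dom_gen_tokens_from_string string → Spec_gen_tokens_from_string string (gen_tokens_from_string string)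

-- ===== LEMMAS AND PROOFS =====
theorem pvALoop_eq (l : List Char) : ∀ word : List Char,
    pvALoop l word =
      if word = [] then pvBRuns l
      else String.mk (word ++ l.takeWhile PySem.Chars.isalpha)
            :: pvBRuns (l.dropWhile PySem.Chars.isalpha) := by
  induction l with
  | nil =>
    intro word
    by_cases h : word = [] <;> simp [pvALoop, pvBRuns, h]
  | cons c rest ih =>
    intro word
    by_cases hc : PySem.Chars.isalpha c
    · by_cases h : word = [] <;>
        simp [pvALoop, pvBRuns, hc, h, ih]
    · by_cases h : word = [] <;>
        simp [pvALoop, pvBRuns, hc, h, ih]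

-- ===== VERDICT =====
theorem gen_tokens_from_string_spec : Claim_equal_gen_tokens_from_string := by
  intro s _
  unfold Spec_gen_tokens_from_string gen_tokens_from_string gen_tokens_from_string_alt
  simp [pvALoop_eq]
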